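-- pv_equiv track=rewrite | github.com/aabushnell/date-cleaning-package | DateCleaning/chronontology.py | erase_keywords_both
-- ===== SOURCE A (Python) =====
-- def erase_keywords_both(string1, string2, words_to_erase):
--     """
--         some keywords are relevant in the string but is better to
--         compute the match score without them. Like "early bronze age" and
--         "early iron age" can have a high score, so we remove early and age from
--         both strings. The strings are remove ONLY if they are present in both
--         strings
--         :return: string1, string2 without the words_to_erase
--     """
--     list_string_1 = string1.split()
--     list_string_2 = string2.split()
--     for word in words_to_erase:
--         if word in list_string_1 and word in list_string_2:
--             list_string_1.remove(word)
--             list_string_2.remove(word)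
--     return " ".join(list_string_1), " ".join(list_string_2)
-- ===== SOURCE B (Python) =====
-- def erase_keywords_both(string1, string2, words_to_erase):
--     l1 = string1.split()
--     l2 = string2.split()
--
--     def counts(ws):
--         c = {}
--         for w in ws:
--             c[w] = c.get(w, 0) + 1
--         return c
--
--     c1 = counts(l1)
--     c2 = counts(l2)
--     ce = counts(words_to_erase)
--     rem = {}
--     for w, c in ce.items():
--         rem[w] = min(c, c1.get(w, 0), c2.get(w, 0))
--
--     def strip_first(ws, left):
--         out = []
--         for w in ws:
--             k = left.get(w, 0)
--             if k > 0:
--                 left[w] = k - 1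
--             else:
--                 out.append(w)
--         return out
--
--     out1 = strip_first(l1, dict(rem))
--     out2 = strip_first(l2, rem)
--     return " ".join(out1), " ".join(out2)
-- ===== Notes on version B (the rewrite author's own statement) =====
-- stated objective: alternative
-- what changed: Replaces A's per-keyword membership tests and list.remove scans with multiplicity counters (removal count per word = min of its counts in the keywords and in each string) followed by one order-preserving skip pass per string.
import Mathlib
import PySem

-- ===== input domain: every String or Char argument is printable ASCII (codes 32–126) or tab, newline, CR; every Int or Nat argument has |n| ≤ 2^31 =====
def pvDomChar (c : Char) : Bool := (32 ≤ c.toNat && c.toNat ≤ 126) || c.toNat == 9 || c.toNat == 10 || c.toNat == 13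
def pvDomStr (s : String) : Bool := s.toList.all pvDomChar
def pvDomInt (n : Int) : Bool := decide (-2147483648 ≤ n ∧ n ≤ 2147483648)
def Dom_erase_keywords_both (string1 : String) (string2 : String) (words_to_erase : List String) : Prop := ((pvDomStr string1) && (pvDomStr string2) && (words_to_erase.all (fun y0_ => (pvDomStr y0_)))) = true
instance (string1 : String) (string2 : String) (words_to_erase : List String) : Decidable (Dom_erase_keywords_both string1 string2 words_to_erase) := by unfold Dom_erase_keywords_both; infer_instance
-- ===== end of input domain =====

-- B replaces A's per-keyword membership tests + list.remove scans by multiplicity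
-- counters and one order-preserving skip pass per string (objective: alternative).

-- ===== PORT A =====
def erase_keywords_both (string1 : String) (string2 : String) (words_to_erase : List String) : String × String :=
  let list_string_1 := PySem.Str.split₀ string1
  let list_string_2 := PySem.Str.split₀ string2
  let p := words_to_erase.foldl
    (fun (st : List String × List String) word =>
      if word ∈ st.1 ∧ word ∈ st.2 then
        -- list.remove(word) is guarded by the membership test, so remove? is some
        ((PySem.List.remove? st.1 word).getD st.1, (PySem.List.remove? st.2 word).getD st.2)
      else st)
    (list_string_1, list_string_2)
  (PySem.Str.join " " p.1, PySem.Str.join " " p.2)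

-- ===== PORT B =====
-- helper `counts` of Source B
def pvCounts (ws : List String) : PySem.Dict String Int :=
  ws.foldl (fun c w => c.insert w (c.getD w 0 + 1)) PySem.Dict.empty

-- helper `strip_first` of Source B: skip the first left[w] occurrences of each w
def pvStripFirst (ws : List String) (left : PySem.Dict String Int) : List String :=
  (ws.foldl
    (fun (st : List String × PySem.Dict String Int) w =>
      let k := st.2.getD w 0
      if 0 < k then (st.1, st.2.insert w (k - 1)) else (st.1 ++ [w], st.2))
    ([], left)).1

def erase_keywords_both_alt (string1 : String) (string2 : String) (words_to_erase : List String) : String × String :=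
  let l1 := PySem.Str.split₀ string1
  let l2 := PySem.Str.split₀ string2
  let c1 := pvCounts l1
  let c2 := pvCounts l2
  let ce := pvCounts words_to_erase
  let rem := ce.items.foldl
    (fun (r : PySem.Dict String Int) wc =>
      r.insert wc.1 (min (min wc.2 (c1.getD wc.1 0)) (c2.getD wc.1 0)))
    PySem.Dict.empty
  (PySem.Str.join " " (pvStripFirst l1 rem), PySem.Str.join " " (pvStripFirst l2 rem))

-- ===== PRECONDITION & SPEC =====
def Spec_erase_keywords_both (string1 : String) (string2 : String) (words_to_erase : List String) (out : String × String) : Prop := out = erase_keywords_both_alt string1 string2 words_to_erase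
instance (string1 : String) (string2 : String) (words_to_erase : List String) (out : String × String) : Decidable (Spec_erase_keywords_both string1 string2 words_to_erase out) := by unfold Spec_erase_keywords_both; infer_instance

-- ===== CLAIM (what is proved, stated in full; the proofs are below) =====
def Claim_equal_erase_keywords_both : Prop := ∀ (string1 : String) (string2 : String) (words_to_erase : List String), Dom_erase_keywords_both string1 string2 words_to_erase → Spec_erase_keywords_both string1 string2 words_to_erase (erase_keywords_both string1 string2 words_to_erase)

-- ===== LEMMAS AND PROOFS =====

-- drop the first (g w) occurrences of each word w
def pvDropK : List String → (String → Nat) → List String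
  | [], _ => []
  | x :: xs, g =>
    if 0 < g x then pvDropK xs (fun u => if u = x then g u - 1 else g u)
    else x :: pvDropK xs g

-- how many copies of w the whole loop of A removes from each list
def pvG (we l1 l2 : List String) (w : String) : Nat :=
  min (min (we.count w) (l1.count w)) (l2.count w)

lemma pvDropK_zero (l : List String) : pvDropK l (fun _ => 0) = l := by
  induction l with
  | nil => rfl
  | cons x xs ih => simp [pvDropK, ih]

lemma pvDropK_cons_pos (x : String) (xs : List String) (g : String → Nat) (h : 0 < g x) :
    pvDropK (x :: xs) g = pvDropK xs (fun u => if u = x then g u - 1 else g u) := by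
  simp only [pvDropK, if_pos h]

lemma pvDropK_cons_neg (x : String) (xs : List String) (g : String → Nat) (h : ¬ 0 < g x) :
    pvDropK (x :: xs) g = x :: pvDropK xs g := by
  simp only [pvDropK, if_neg h]

lemma pvDropK_erase (l : List String) (g : String → Nat) (w : String)
    (hw : w ∈ l) (hg : 0 < g w) :
    pvDropK l g = pvDropK (l.erase w) (fun u => if u = w then g u - 1 else g u) := by
  induction l generalizing g with
  | nil => cases hw
  | cons x xs ih =>
    by_cases hx : x = w
    · subst hx
      rw [List.erase_cons_head, pvDropK_cons_pos _ _ _ hg]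
    · have hw' : w ∈ xs := by
        cases List.mem_cons.mp hw with
        | inl h => exact absurd h.symm hx
        | inr h => exact h
      rw [List.erase_cons_tail (by simp [hx])]
      by_cases hgx : 0 < g x
      · rw [pvDropK_cons_pos _ _ _ hgx, ih _ hw' (by rw [if_neg (fun hh : w = x => hx hh.symm)]; exact hg),
          pvDropK_cons_pos x (xs.erase w) _ (by rw [if_neg hx]; exact hgx)]
        congr 1
        funext u
        by_cases hu1 : u = x <;> by_cases hu2 : u = w <;> simp_all
      · rw [pvDropK_cons_neg _ _ _ hgx,
          pvDropK_cons_neg x (xs.erase w) _ (by rw [if_neg hx]; exact hgx), ih _ hw' hg]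

lemma pvFoldA (we l1 l2 : List String) :
    we.foldl
      (fun (st : List String × List String) word =>
        if word ∈ st.1 ∧ word ∈ st.2 then
          ((PySem.List.remove? st.1 word).getD st.1, (PySem.List.remove? st.2 word).getD st.2)
        else st)
      (l1, l2)
    = (pvDropK l1 (pvG we l1 l2), pvDropK l2 (pvG we l1 l2)) := by
  induction we generalizing l1 l2 with
  | nil =>
    have h : pvG [] l1 l2 = fun _ => 0 := by funext w; simp [pvG]
    simp [h, pvDropK_zero]
  | cons w ws ih =>
    by_cases h : w ∈ l1 ∧ w ∈ l2
    · have e1 : PySem.List.remove? l1 w = some (l1.erase w) :=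
        PySem.List.remove?_eq_some_erase l1 w h.1
      have e2 : PySem.List.remove? l2 w = some (l2.erase w) :=
        PySem.List.remove?_eq_some_erase l2 w h.2
      rw [List.foldl_cons]
      simp only [if_pos h, e1, e2, Option.getD_some]
      rw [ih]
      have hc1 : 0 < l1.count w := List.count_pos_iff.mpr h.1
      have hc2 : 0 < l2.count w := List.count_pos_iff.mpr h.2
      have hg : 0 < pvG (w :: ws) l1 l2 w := by
        simp only [pvG, List.count_cons_self]; omega
      have key : ∀ l, w ∈ l →
          pvDropK l (pvG (w :: ws) l1 l2)
            = pvDropK (l.erase w) (fun u => if u = w then pvG (w :: ws) l1 l2 u - 1 else pvG (w :: ws) l1 l2 u) :=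
        fun l hl => pvDropK_erase l _ w hl hg
      have hfun : (fun u => if u = w then pvG (w :: ws) l1 l2 u - 1 else pvG (w :: ws) l1 l2 u)
          = pvG ws (l1.erase w) (l2.erase w) := by
        funext u
        by_cases hu : u = w
        · subst hu
          rw [if_pos rfl]
          simp only [pvG, List.count_cons_self, List.count_erase_self]
          omega
        · have hwu : ¬ (w = u) := fun hh => hu hh.symm
          rw [if_neg hu]
          simp only [pvG, List.count_cons, beq_iff_eq, if_neg hwu, Nat.add_zero,
            List.count_erase_of_ne hu]
      rw [key l1 h.1, key l2 h.2, hfun]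
    · rw [List.foldl_cons]
      simp only [if_neg h]
      rw [ih]
      have hz : l1.count w = 0 ∨ l2.count w = 0 := by
        rcases not_and_or.mp h with h1 | h1
        · exact Or.inl (List.count_eq_zero.mpr h1)
        · exact Or.inr (List.count_eq_zero.mpr h1)
      have hfun : pvG (w :: ws) l1 l2 = pvG ws l1 l2 := by
        funext u
        by_cases hu : u = w
        · subst hu
          simp only [pvG, List.count_cons_self]
          omega
        · have hwu : ¬ (w = u) := fun hh => hu hh.symm
          simp only [pvG, List.count_cons, beq_iff_eq, if_neg hwu, Nat.add_zero]
      rw [hfun]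

lemma pvStrip (l : List String) (acc : List String) (d : PySem.Dict String Int) :
    (l.foldl
      (fun (st : List String × PySem.Dict String Int) w =>
        let k := st.2.getD w 0
        if 0 < k then (st.1, st.2.insert w (k - 1)) else (st.1 ++ [w], st.2))
      (acc, d)).1
    = acc ++ pvDropK l (fun w => (d.getD w 0).toNat) := by
  induction l generalizing acc d with
  | nil => simp [pvDropK]
  | cons x xs ih =>
    by_cases hk : 0 < d.getD x 0
    · rw [List.foldl_cons]
      simp only [if_pos hk]
      rw [ih]
      have hfun : (fun w => ((d.insert x (d.getD x 0 - 1)).getD w 0).toNat)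
          = fun u => if u = x then (d.getD u 0).toNat - 1 else (d.getD u 0).toNat := by
        funext u
        rw [PySem.Dict.getD_insert]
        by_cases hu : u = x
        · subst hu; simp [Int.pred_toNat]
        · simp [hu]
      rw [hfun]
      have hx : 0 < (d.getD x 0).toNat := by omega
      rw [pvDropK_cons_pos _ _ _ hx]
    · rw [List.foldl_cons]
      simp only [if_neg hk]
      rw [ih]
      have hx : ¬ 0 < (d.getD x 0).toNat := by omega
      rw [pvDropK_cons_neg _ _ _ hx]
      simp

lemma pvGetD_foldl_insert (ks : List String) (F : String → Int) (d : PySem.Dict String Int) (w : String) :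
    (ks.foldl (fun r k => r.insert k (F k)) d).getD w 0
      = if w ∈ ks then F w else d.getD w 0 := by
  induction ks generalizing d with
  | nil => simp
  | cons k rest ih =>
    rw [List.foldl_cons, ih]
    rw [PySem.Dict.getD_insert]
    by_cases h1 : w ∈ rest <;> by_cases h2 : w = k <;> simp [h1, h2]

lemma pvCounts_eq (ws : List String) : pvCounts ws = PySem.Dict.counter ws :=
  PySem.Dict.foldl_insert_getD_add_one_eq_counter ws

lemma pvRem_getD (we l1 l2 : List String) (w : String) :
    (((pvCounts we).items.foldl
        (fun (r : PySem.Dict String Int) wc =>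
          r.insert wc.1 (min (min wc.2 ((pvCounts l1).getD wc.1 0)) ((pvCounts l2).getD wc.1 0)))
        PySem.Dict.empty).getD w 0).toNat
      = pvG we l1 l2 w := by
  rw [pvCounts_eq we, pvCounts_eq l1, pvCounts_eq l2]
  rw [PySem.Dict.items_counter, List.foldl_map, pvGetD_foldl_insert]
  by_cases h : w ∈ PySem.Set.ofList we
  · have hwe : w ∈ we := (PySem.Set.mem_ofList _ _).mp h
    rw [if_pos h]
    simp only [PySem.Dict.getD_counter, pvG]
    omega
  · have hwe : w ∉ we := fun hc => h ((PySem.Set.mem_ofList _ _).mpr hc)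
    rw [if_neg h]
    have : we.count w = 0 := List.count_eq_zero.mpr hwe
    simp [pvG, this, PySem.Dict.getD_empty]

lemma pvMain (string1 string2 : String) (words_to_erase : List String) :
    erase_keywords_both string1 string2 words_to_erase
      = erase_keywords_both_alt string1 string2 words_to_erase := by
  unfold erase_keywords_both erase_keywords_both_alt pvStripFirst
  simp only []
  rw [pvFoldA, pvStrip, pvStrip, List.nil_append, List.nil_append]
  have hfun : (fun w =>
        (((pvCounts words_to_erase).items.foldl
            (fun (r : PySem.Dict String Int) wc =>
              r.insert wc.1 (min (min wc.2 ((pvCounts (PySem.Str.split₀ string1)).getD wc.1 0))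
                ((pvCounts (PySem.Str.split₀ string2)).getD wc.1 0)))
            PySem.Dict.empty).getD w 0).toNat)
      = pvG words_to_erase (PySem.Str.split₀ string1) (PySem.Str.split₀ string2) := by
    funext w
    exact pvRem_getD words_to_erase (PySem.Str.split₀ string1) (PySem.Str.split₀ string2) w
  rw [hfun]

-- ===== VERDICT (by name: the statement is the Claim_ definition above) =====
theorem erase_keywords_both_spec : Claim_equal_erase_keywords_both := by
  intro string1 string2 words_to_erase _
  unfold Spec_erase_keywords_both
  exact pvMain string1 string2 words_to_erase
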